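-- pv_equiv track=rewrite | github.com/qjtheron1983/hamba | build.py | replace_svg
-- ===== SOURCE A (Python) =====
-- def replace_svg(content, old_marker, new_svg):
--     """Find SVG by unique marker text and replace it safely"""
--     start = content.find(old_marker)
--     if start == -1:
--         return content, False
--     # Find the opening <svg tag before the marker
--     svg_start = content.rfind('<svg', 0, start)
--     if svg_start == -1:
--         return content, False
--     # Find matching </svg> - count nesting
--     pos = svg_start
--     depth = 0
--     while pos < len(content):
--         if content[pos:pos+4] == '<svg':
--             depth += 1
--             pos += 4
--         elif content[pos:pos+6] == '</svg>':
--             depth -= 1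
--             if depth == 0:
--                 svg_end = pos + 6
--                 result = content[:svg_start] + new_svg + content[svg_end:]
--                 return result, True
--             pos += 6
--         else:
--             pos += 1
--     return content, False
-- ===== SOURCE B (Python) =====
-- def replace_svg(content, old_marker, new_svg):
--     """Find SVG by unique marker text and replace it safely"""
--     start = content.find(old_marker)
--     if start == -1:
--         return content, False
--     svg_start = content.rfind('<svg', 0, start)
--     if svg_start == -1:
--         return content, False
--     # Pass 1: build the ordered stream of tag events at or after svg_start.
--     # Tokens cannot overlap ('<svg' / '</svg>' contain no inner '<'), so a
--     # plain per-index scan yields exactly the tag tokens in order.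
--     events = []
--     for i in range(svg_start, len(content)):
--         if content.startswith('<svg', i):
--             events.append((i, True))
--         elif content.startswith('</svg>', i):
--             events.append((i, False))
--     # Pass 2: fold the nesting depth over the event stream.
--     depth = 0
--     for pos, is_open in events:
--         if is_open:
--             depth += 1
--         else:
--             depth -= 1
--             if depth == 0:
--                 return content[:svg_start] + new_svg + content[pos + 6:], True
--     return content, False
-- ===== Notes on version B (the rewrite author's own statement) =====
-- stated objective: alternative
-- what changed: A walks a cursor through the string jumping 4/6/1 chars while updating depth in the same loop; B separates concerns: one pass builds an ordered list of tag events (position, open/close), then a second pass folds the nesting depth over that event stream.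
import Mathlib
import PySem

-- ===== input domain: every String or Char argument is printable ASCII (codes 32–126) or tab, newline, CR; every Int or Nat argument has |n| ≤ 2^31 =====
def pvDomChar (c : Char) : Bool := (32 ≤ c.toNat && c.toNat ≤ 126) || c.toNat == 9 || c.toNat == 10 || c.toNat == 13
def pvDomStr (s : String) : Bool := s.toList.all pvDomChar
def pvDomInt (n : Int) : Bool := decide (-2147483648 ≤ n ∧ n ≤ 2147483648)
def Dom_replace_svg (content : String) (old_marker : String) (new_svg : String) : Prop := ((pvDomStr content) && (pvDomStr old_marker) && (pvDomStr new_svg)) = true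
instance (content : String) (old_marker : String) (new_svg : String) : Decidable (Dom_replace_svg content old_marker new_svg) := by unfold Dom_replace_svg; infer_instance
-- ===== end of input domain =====

-- B replaces A's single cursor-jumping depth loop by two passes: build the ordered list of
-- tag events, then fold the nesting depth over that event stream (alternative decomposition,
-- same cost; return value proved equal).

-- ===== PORT A =====
-- the cursor loop of A: returns some svg_end when the matching '</svg>' closes depth to 0
def aLoop (cs : List Char) (pos : Nat) (depth : Int) : Option Nat :=
  if pos < cs.length then
    if PySem.List.slice cs (some (pos : Int)) (some ((pos : Int) + 4)) = ['<','s','v','g'] then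
      aLoop cs (pos + 4) (depth + 1)
    else if PySem.List.slice cs (some (pos : Int)) (some ((pos : Int) + 6)) = ['<','/','s','v','g','>'] then
      (if depth - 1 = 0 then some (pos + 6) else aLoop cs (pos + 6) (depth - 1))
    else
      aLoop cs (pos + 1) depth
  else none
termination_by cs.length - pos

def replace_svg (content : String) (old_marker : String) (new_svg : String) : String × Bool :=
  let start := PySem.Str.find content old_marker
  if start = -1 then (content, false)
  else
    let svg_start := PySem.Str.rfindFrom content "<svg" 0 (some start)
    if svg_start = -1 then (content, false)
    else
      match aLoop content.toList svg_start.toNat 0 with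
      | some svg_end =>
          (String.ofList (PySem.List.slice content.toList none (some svg_start) ++ new_svg.toList
            ++ PySem.List.slice content.toList (some (svg_end : Int)) none), true)
      | none => (content, false)

-- ===== PORT B =====
-- one event per index where a tag token starts: (position, is_open)
def bToken? (cs : List Char) (i : Nat) : Option (Nat × Bool) :=
  if PySem.Chars.startswith (cs.drop i) ['<','s','v','g'] then some (i, true)
  else if PySem.Chars.startswith (cs.drop i) ['<','/','s','v','g','>'] then some (i, false)
  else none

-- pass 1 of B: the ordered event stream from position p
def bEvents (cs : List Char) (p : Nat) : List (Nat × Bool) :=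
  (PySem.List.pyRange (p : Int) (cs.length : Int) 1).filterMap (fun i => bToken? cs i.toNat)

-- pass 2 of B: fold the depth over the event stream
def bScan : List (Nat × Bool) → Int → Option Nat
  | [], _ => none
  | (pos, isOpen) :: rest, depth =>
      if isOpen then bScan rest (depth + 1)
      else if depth - 1 = 0 then some (pos + 6) else bScan rest (depth - 1)

def replace_svg_alt (content : String) (old_marker : String) (new_svg : String) : String × Bool :=
  let start := PySem.Str.find content old_marker
  if start = -1 then (content, false)
  else
    let svg_start := PySem.Str.rfindFrom content "<svg" 0 (some start)
    if svg_start = -1 then (content, false)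
    else
      match bScan (bEvents content.toList svg_start.toNat) 0 with
      | some cut =>
          (String.ofList (PySem.List.slice content.toList none (some svg_start) ++ new_svg.toList
            ++ PySem.List.slice content.toList (some (cut : Int)) none), true)
      | none => (content, false)

-- ===== PRECONDITION & SPEC =====
def Spec_replace_svg (content : String) (old_marker : String) (new_svg : String) (out : String × Bool) : Prop := out = replace_svg_alt content old_marker new_svg
instance (content : String) (old_marker : String) (new_svg : String) (out : String × Bool) : Decidable (Spec_replace_svg content old_marker new_svg out) := by unfold Spec_replace_svg; infer_instance

-- ===== CLAIM (what is proved, stated in full; the proofs are below) =====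
def Claim_equal_replace_svg : Prop := ∀ (content : String) (old_marker : String) (new_svg : String), Dom_replace_svg content old_marker new_svg → Spec_replace_svg content old_marker new_svg (replace_svg content old_marker new_svg)

-- ===== LEMMAS AND PROOFS =====

lemma startswith_false {s p : List Char} (h : ¬ p <+: s) : PySem.Chars.startswith s p = false := by
  by_contra hb
  rw [Bool.not_eq_false, PySem.Chars.startswith_iff] at hb
  exact h hb

-- both slice tests of A are prefix tests on the dropped suffix
lemma slice_tok_eq_iff (cs : List Char) (p k : Nat) (ki : Int) (hki : ki = (k : Int)) (tok : List Char) (hk : tok.length = k) :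
    (PySem.List.slice cs (some (p : Int)) (some ((p : Int) + ki)) = tok) ↔ tok <+: cs.drop p := by
  rw [hki, PySem.List.slice_natCast_add, List.prefix_iff_eq_take, ← hk]
  exact ⟨fun h => h.symm, fun h => h.symm⟩

-- no tag token starts at a position whose char is not '<'
lemma bToken?_none (cs : List Char) (i : Nat) (h : (cs.drop i).head? ≠ some '<') :
    bToken? cs i = none := by
  unfold bToken?
  have h4 : PySem.Chars.startswith (cs.drop i) ['<','s','v','g'] = false := by
    by_contra hb
    rw [Bool.not_eq_false, PySem.Chars.startswith_iff] at hb
    obtain ⟨t, ht⟩ := hb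
    rw [← ht] at h; simp at h
  have h6 : PySem.Chars.startswith (cs.drop i) ['<','/','s','v','g','>'] = false := by
    by_contra hb
    rw [Bool.not_eq_false, PySem.Chars.startswith_iff] at hb
    obtain ⟨t, ht⟩ := hb
    rw [← ht] at h; simp at h
  simp [h4, h6]

lemma bEvents_nil (cs : List Char) (p : Nat) (hp : cs.length ≤ p) : bEvents cs p = [] := by
  unfold bEvents
  rw [PySem.List.pyRange_one]
  have h0 : ((cs.length : Int) - (p : Int)).toNat = 0 := by omega
  simp [h0]

lemma bEvents_cons (cs : List Char) (p : Nat) (hp : p < cs.length) :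
    bEvents cs p = (bToken? cs p).toList ++ bEvents cs (p + 1) := by
  unfold bEvents
  rw [PySem.List.pyRange_one_cons (by exact_mod_cast hp)]
  have h1 : ((p : Int) + 1) = ((p + 1 : Nat) : Int) := by push_cast; ring
  rw [List.filterMap_cons, h1]
  cases h : bToken? cs p <;> simp [h]

-- skipped positions inside a matched token carry no event
lemma bEvents_skip (cs : List Char) (p : Nat) (c : Char) (t : List Char) (hc : c ≠ '<')
    (hd : cs.drop p = c :: t) (hp : p < cs.length) :
    bEvents cs p = bEvents cs (p + 1) := by
  rw [bEvents_cons cs p hp, bToken?_none cs p (by rw [hd]; simp [hc])]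
  rfl

-- the core: A's cursor loop equals B's fold over the event stream
lemma scan_eq_aux (cs : List Char) :
    ∀ (fuel p : Nat) (depth : Int), cs.length ≤ p + fuel →
      aLoop cs p depth = bScan (bEvents cs p) depth := by
  intro fuel
  induction fuel with
  | zero =>
    intro p depth hle
    rw [aLoop, if_neg (by omega), bEvents_nil cs p (by omega)]
    rfl
  | succ f ih =>
    intro p depth hle
    by_cases hp : p < cs.length
    · have hlen : (cs.drop p).length = cs.length - p := List.length_drop
      by_cases h4 : ['<','s','v','g'] <+: cs.drop p
      · -- '<svg' at p
        obtain ⟨t, ht⟩ := h4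
        have hb : p + 4 ≤ cs.length := by
          have := congrArg List.length ht; simp at this; omega
        have hdk : ∀ k : Nat, k ≤ 4 → cs.drop (p + k) = (['<','s','v','g'].drop k) ++ t := by
          intro k hk
          rw [← List.drop_drop (j := p) (i := k), ← ht, List.drop_append_of_le_length (by simp; omega)]
        rw [aLoop, if_pos hp,
          if_pos ((slice_tok_eq_iff cs p 4 4 (by norm_num) _ rfl).mpr ⟨t, ht⟩),
          bEvents_cons cs p hp]
        have htk : bToken? cs p = some (p, true) := by
          unfold bToken?
          rw [if_pos (by rw [PySem.Chars.startswith_iff]; exact ⟨t, ht⟩)]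
        rw [htk,
          bEvents_skip cs (p + 1) 's' _ (by decide) (hdk 1 (by omega)) (by omega),
          bEvents_skip cs (p + 2) 'v' _ (by decide) (hdk 2 (by omega)) (by omega),
          bEvents_skip cs (p + 3) 'g' _ (by decide) (hdk 3 (by omega)) (by omega)]
        show aLoop cs (p + 4) (depth + 1) = bScan ((p, true) :: bEvents cs (p + 1 + 1 + 1 + 1)) depth
        have h14 : p + 1 + 1 + 1 + 1 = p + 4 := by omega
        rw [h14]
        exact ih (p + 4) (depth + 1) (by omega)
      · by_cases h6 : ['<','/','s','v','g','>'] <+: cs.drop p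
        · -- '</svg>' at p
          obtain ⟨t, ht⟩ := h6
          have hb : p + 6 ≤ cs.length := by
            have := congrArg List.length ht; simp at this; omega
          have hdk : ∀ k : Nat, k ≤ 6 → cs.drop (p + k) = (['<','/','s','v','g','>'].drop k) ++ t := by
            intro k hk
            rw [← List.drop_drop (j := p) (i := k), ← ht, List.drop_append_of_le_length (by simp; omega)]
          rw [aLoop, if_pos hp,
            if_neg (by rw [slice_tok_eq_iff cs p 4 4 (by norm_num) _ rfl]; exact h4),
            if_pos ((slice_tok_eq_iff cs p 6 6 (by norm_num) _ rfl).mpr ⟨t, ht⟩),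
            bEvents_cons cs p hp]
          have htk : bToken? cs p = some (p, false) := by
            unfold bToken?
            rw [if_neg (by simp [startswith_false h4]),
              if_pos (by rw [PySem.Chars.startswith_iff]; exact ⟨t, ht⟩)]
          rw [htk,
            bEvents_skip cs (p + 1) '/' _ (by decide) (hdk 1 (by omega)) (by omega),
            bEvents_skip cs (p + 2) 's' _ (by decide) (hdk 2 (by omega)) (by omega),
            bEvents_skip cs (p + 3) 'v' _ (by decide) (hdk 3 (by omega)) (by omega),
            bEvents_skip cs (p + 4) 'g' _ (by decide) (hdk 4 (by omega)) (by omega),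
            bEvents_skip cs (p + 5) '>' _ (by decide) (hdk 5 (by omega)) (by omega)]
          show (if depth - 1 = 0 then some (p + 6) else aLoop cs (p + 6) (depth - 1))
              = bScan ((p, false) :: bEvents cs (p + 1 + 1 + 1 + 1 + 1 + 1)) depth
          have h16 : p + 1 + 1 + 1 + 1 + 1 + 1 = p + 6 := by omega
          rw [h16]
          show _ = if (false : Bool) = true then bScan (bEvents cs (p + 6)) (depth + 1)
              else if depth - 1 = 0 then some (p + 6) else bScan (bEvents cs (p + 6)) (depth - 1)
          by_cases hz : depth - 1 = 0
          · simp [hz]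
          · simp only [hz, if_false, Bool.false_eq_true]
            exact ih (p + 6) (depth - 1) (by omega)
        · -- no token at p
          have htk : bToken? cs p = none := by
            unfold bToken?
            rw [if_neg (by simp [startswith_false h4]), if_neg (by simp [startswith_false h6])]
          rw [aLoop, if_pos hp,
            if_neg (by rw [slice_tok_eq_iff cs p 4 4 (by norm_num) _ rfl]; exact h4),
            if_neg (by rw [slice_tok_eq_iff cs p 6 6 (by norm_num) _ rfl]; exact h6),
            bEvents_cons cs p hp, htk]
          show aLoop cs (p + 1) depth = bScan (bEvents cs (p + 1)) depth
          exact ih (p + 1) depth (by omega)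
    · rw [aLoop, if_neg hp, bEvents_nil cs p (by omega)]
      rfl

lemma scan_eq (cs : List Char) (p : Nat) (depth : Int) :
    aLoop cs p depth = bScan (bEvents cs p) depth :=
  scan_eq_aux cs cs.length p depth (by omega)

-- ===== VERDICT (by name: the statement is the Claim_ definition above) =====
theorem replace_svg_spec : Claim_equal_replace_svg := by
  intro content old_marker new_svg _
  unfold Spec_replace_svg replace_svg replace_svg_alt
  simp only [scan_eq]
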